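-- pv_equiv track=rewrite | github.com/CBDD/rDock | rdock-utils/rdock_utils/sdtether_original.py | prepareAtomString
-- ===== SOURCE A (Python) =====
-- def prepareAtomString(idlist):
--     s = ""
--     n = len(idlist)
--     for i, id in enumerate(idlist):
--         s += "%i" % id
--         if (i + 1) == n:
--             s += "\n"
--         elif (i + 1) % 35 == 0:
--             s += ",\n"
--         else:
--             s += ","
--     return s
-- ===== SOURCE B (Python) =====
-- def prepareAtomString(idlist):
--     if not idlist:
--         return ""
--     lines = [",".join("%i" % id for id in idlist[i : i + 35]) for i in range(0, len(idlist), 35)]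
--     return ",\n".join(lines) + "\n"
-- ===== Notes on version B (the rewrite author's own statement) =====
-- stated objective: idiomatic
-- what changed: Replaces the per-element accumulator loop with its two position-dependent separator branches by chunking the list into groups of 35 and joining: elements joined with ',' inside a chunk, chunks joined with ',\n', plus a final '\n' (empty list guarded to return '').
import Mathlib
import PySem

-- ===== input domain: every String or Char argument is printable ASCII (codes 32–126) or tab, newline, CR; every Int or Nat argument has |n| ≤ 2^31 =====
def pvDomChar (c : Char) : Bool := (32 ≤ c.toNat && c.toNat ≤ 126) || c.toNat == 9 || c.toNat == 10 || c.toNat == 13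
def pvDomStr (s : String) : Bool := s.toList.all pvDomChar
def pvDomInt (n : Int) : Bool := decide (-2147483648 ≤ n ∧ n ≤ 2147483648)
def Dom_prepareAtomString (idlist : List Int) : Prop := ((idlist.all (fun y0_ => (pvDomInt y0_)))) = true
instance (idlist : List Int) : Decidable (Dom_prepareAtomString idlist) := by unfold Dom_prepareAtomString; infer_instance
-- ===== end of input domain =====

-- B is an idiomatic restructuring: chunk the list into groups of 35 and join, instead of
-- A's accumulator loop with position-dependent separator branches. Equal on all inputs.

-- ===== PORT A =====
-- A: s = ""; for i, id in enumerate(idlist): s += "%i" % id; then "\n" / ",\n" / ","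
def prepareAtomString (idlist : List Int) : String :=
  let n : Int := idlist.length
  (PySem.List.enumerate idlist).foldl
    (fun s p =>
      let s := s ++ PySem.Int.toStr p.2
      if p.1 + 1 = n then s ++ "\n"
      else if PySem.Int.mod (p.1 + 1) 35 = 0 then s ++ ",\n"
      else s ++ ",") ""

-- ===== PORT B =====
-- helper: port of str.join(sep, parts)
def joinSep (sep : String) : List String → String
  | [] => ""
  | [x] => x
  | x :: y :: xs => x ++ sep ++ joinSep sep (y :: xs)

-- helper: consecutive chunks of 35 (the slices idlist[i:i+35], i = 0, 35, …)
def chunks35 : List Int → List (List Int)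
  | [] => []
  | x :: xs => ((x :: xs).take 35) :: chunks35 ((x :: xs).drop 35)
termination_by l => l.length
decreasing_by simp

def prepareAtomString_alt (idlist : List Int) : String :=
  if idlist = [] then ""
  else joinSep ",\n" ((chunks35 idlist).map (fun c => joinSep "," (c.map PySem.Int.toStr))) ++ "\n"

-- ===== PRECONDITION & SPEC =====
def Spec_prepareAtomString (idlist : List Int) (out : String) : Prop := out = prepareAtomString_alt idlist
instance (idlist : List Int) (out : String) : Decidable (Spec_prepareAtomString idlist out) := by unfold Spec_prepareAtomString; infer_instance

-- ===== CLAIM (what is proved, stated in full; the proofs are below) =====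
def Claim_equal_prepareAtomString : Prop := ∀ (idlist : List Int), Dom_prepareAtomString idlist → Spec_prepareAtomString idlist (prepareAtomString idlist)

-- ===== LEMMAS AND PROOFS =====

theorem pymod35 (a : Int) : PySem.Int.mod a 35 = a % 35 :=
  PySem.Int.mod_eq_emod_of_pos (by norm_num)

-- the suffix rendered by A's loop from absolute position k, with total length n
def tailA (n : Int) : Int → List Int → String
  | _, [] => ""
  | k, x :: xs =>
      PySem.Int.toStr x ++
        (if k + 1 = n then "\n"
         else if PySem.Int.mod (k + 1) 35 = 0 then ",\n"
         else ",") ++ tailA n (k + 1) xs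

theorem tailA_nil (n k : Int) : tailA n k [] = "" := rfl

theorem tailA_cons (n k : Int) (x : Int) (xs : List Int) :
    tailA n k (x :: xs) =
      PySem.Int.toStr x ++
        (if k + 1 = n then "\n"
         else if PySem.Int.mod (k + 1) 35 = 0 then ",\n"
         else ",") ++ tailA n (k + 1) xs := rfl

theorem foldl_eq_tailA (n : Int) (l : List Int) : ∀ (k : Int) (s : String),
    (PySem.List.enumerate l k).foldl
      (fun s p =>
        let s := s ++ PySem.Int.toStr p.2
        if p.1 + 1 = n then s ++ "\n"
        else if PySem.Int.mod (p.1 + 1) 35 = 0 then s ++ ",\n"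
        else s ++ ",") s = s ++ tailA n k l := by
  induction l with
  | nil => intro k s; simp [PySem.List.enumerate_nil, tailA]
  | cons x xs ih =>
      intro k s
      rw [PySem.List.enumerate_cons]
      simp only [List.foldl_cons, tailA_cons, ih]
      split_ifs <;> simp [String.append_assoc]

theorem tailA_append (n : Int) (a b : List Int) : ∀ (k : Int),
    tailA n k (a ++ b) = tailA n k a ++ tailA n (k + a.length) b := by
  induction a with
  | nil => intro k; simp [tailA]
  | cons x xs ih =>
      intro k
      simp only [List.cons_append, tailA_cons, ih, List.length_cons, String.append_assoc]
      congr 2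
      push_cast
      ring_nf

-- last chunk: positions c+j … c+j+|l|-1 with c ≡ 0 [35], j+|l| ≤ 35, total n = c+j+|l|
theorem tailA_last (c : Int) (hc : PySem.Int.mod c 35 = 0) :
    ∀ (l : List Int) (j : Int), l ≠ [] → 0 ≤ j → j + l.length ≤ 35 →
      tailA (c + j + l.length) (c + j) l = joinSep "," (l.map PySem.Int.toStr) ++ "\n" := by
  intro l
  induction l with
  | nil => intro j h; exact absurd rfl h
  | cons x xs ih =>
      intro j _ hj hle
      rcases xs with _ | ⟨y, ys⟩
      · simp [tailA, joinSep]
      · have hne : c + j + 1 ≠ c + j + ((x :: y :: ys).length : Int) := by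
          simp only [List.length_cons] at *
          push_cast
          omega
        have hmod : PySem.Int.mod (c + j + 1) 35 ≠ 0 := by
          simp only [pymod35] at *
          simp only [List.length_cons] at hle
          push_cast at hle
          omega
        have ih' := ih (j + 1) (by simp) (by omega)
          (by simp only [List.length_cons] at hle ⊢; push_cast at hle ⊢; omega)
        rw [tailA_cons, if_neg (by simpa using hne), if_neg hmod]
        have harg : c + (j + 1) + ((y :: ys).length : Int)
            = c + j + ((x :: y :: ys).length : Int) := by
          simp only [List.length_cons]; push_cast; ring
        have harg2 : c + (j + 1) = c + j + 1 := by ring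
        rw [harg, harg2] at ih'
        rw [ih']
        simp [joinSep, String.append_assoc]

-- full chunk followed by more: positions c+j … c+34 with j+|l| = 35, c+35 < n
theorem tailA_full (c n : Int) (hc : PySem.Int.mod c 35 = 0) (hn : c + 35 < n) :
    ∀ (l : List Int) (j : Int), l ≠ [] → 0 ≤ j → j + l.length = 35 →
      tailA n (c + j) l = joinSep "," (l.map PySem.Int.toStr) ++ ",\n" := by
  intro l
  induction l with
  | nil => intro j h; exact absurd rfl h
  | cons x xs ih =>
      intro j _ hj hle
      rcases xs with _ | ⟨y, ys⟩
      · -- last element of the chunk: position c+j, j = 34, so (c+j+1) % 35 = 0, c+j+1 ≠ n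
        have hj34 : j = 34 := by simp at hle; omega
        have hne : c + j + 1 ≠ n := by omega
        have hmod : PySem.Int.mod (c + j + 1) 35 = 0 := by
          simp only [pymod35] at *; omega
        rw [tailA_cons, if_neg hne, if_pos hmod, tailA_nil]
        simp [joinSep]
      · have hne : c + j + 1 ≠ n := by
          simp only [List.length_cons] at hle; push_cast at hle; omega
        have hmod : PySem.Int.mod (c + j + 1) 35 ≠ 0 := by
          simp only [pymod35] at *
          simp only [List.length_cons] at hle
          push_cast at hle
          omega
        have ih' := ih (j + 1) (by simp) (by omega)
          (by simp only [List.length_cons] at hle ⊢; push_cast at hle ⊢; omega)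
        have harg2 : c + (j + 1) = c + j + 1 := by ring
        rw [harg2] at ih'
        rw [tailA_cons, if_neg hne, if_neg hmod, ih']
        simp [joinSep, String.append_assoc]

theorem chunks35_ne_nil (l : List Int) (h : l ≠ []) : chunks35 l ≠ [] := by
  cases l with
  | nil => exact absurd rfl h
  | cons x xs => rw [chunks35]; simp

-- main: A's suffix from a chunk boundary k (k ≡ 0 [35]) equals B's chunk rendering
theorem tailA_chunks (l : List Int) : ∀ (k : Int), l ≠ [] → 0 ≤ k → PySem.Int.mod k 35 = 0 →
    tailA (k + l.length) k l =
      joinSep ",\n" ((chunks35 l).map (fun c => joinSep "," (c.map PySem.Int.toStr))) ++ "\n" := by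
  induction l using chunks35.induct with
  | case1 => intro k h; exact absurd rfl h
  | case2 x xs ih =>
      intro k _ hk hkmod
      by_cases hlen : (x :: xs).length ≤ 35
      · -- single (last) chunk
        have htake : (x :: xs).take 35 = x :: xs := List.take_of_length_le hlen
        have hdrop : (x :: xs).drop 35 = [] := List.drop_eq_nil_of_le hlen
        rw [chunks35, htake, hdrop, chunks35]
        have := tailA_last k hkmod (x :: xs) 0 (by simp) le_rfl
          (by omega)
        simp only [add_zero] at this
        rw [this]
        simp [joinSep]
      · -- full chunk + rest
        rw [not_le] at hlen
        have hdrop_ne : (x :: xs).drop 35 ≠ [] := by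
          intro h
          have := List.drop_eq_nil_iff.mp h
          omega
        have hsplit : x :: xs = (x :: xs).take 35 ++ (x :: xs).drop 35 :=
          (List.take_append_drop 35 (x :: xs)).symm
        have hlentake : ((x :: xs).take 35).length = 35 := by
          rw [List.length_take]; omega
        rw [chunks35]
        have hsplit' := congrArg (tailA (k + ((x :: xs).length : Int)) k) hsplit
        rw [tailA_append] at hsplit'
        rw [hsplit']
        have hfull := tailA_full k (k + (x :: xs).length) hkmod
          (by simp only [List.length_cons] at hlen ⊢; push_cast; omega)
          ((x :: xs).take 35) 0 (by simp) le_rfl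
          (by rw [hlentake]; norm_num)
        simp only [add_zero] at hfull
        rw [hfull]
        have hrest := ih (k + 35) hdrop_ne (by omega)
          (by simp only [pymod35] at hkmod ⊢; omega)
        have harg : k + 35 + (((x :: xs).drop 35).length : Int) = k + (x :: xs).length := by
          simp only [List.length_drop]
          omega
        rw [harg] at hrest
        have harg2 : k + (((x :: xs).take 35).length : Int) = k + 35 := by
          rw [hlentake]; norm_num
        rw [harg2, hrest]
        have hne2 := chunks35_ne_nil _ hdrop_ne
        rcases h35 : chunks35 ((x :: xs).drop 35) with _ | ⟨c, cs⟩
        · exact absurd h35 hne2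
        · simp [joinSep, String.append_assoc]

-- ===== VERDICT (by name: the statement is the Claim_ definition above) =====
theorem prepareAtomString_spec : Claim_equal_prepareAtomString := by
  intro idlist _
  unfold Spec_prepareAtomString prepareAtomString prepareAtomString_alt
  rcases h : idlist with _ | ⟨x, xs⟩
  · simp [PySem.List.enumerate_nil]
  · rw [if_neg (by simp)]
    rw [foldl_eq_tailA]
    have := tailA_chunks (x :: xs) 0 (by simp) le_rfl (by simp [PySem.Int.mod])
    simp only [zero_add] at this
    simpa using this
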